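-- pv_equiv track=rewrite | github.com/AmitaiBiton/Image-Processing-Project | projectIM2021_q2.py | build_Guiding_Points
-- ===== SOURCE A (Python) =====
-- def build_Guiding_Points(sort_by_x_distance , list):
--     f1y = sort_by_x_distance[2]
--     f2y = sort_by_x_distance[0]
--     f3y = sort_by_x_distance[4]
--     f4y = sort_by_x_distance[1]
--     f1x = 0
--     f2x = 0
--     f3x = 0
--     f4x = 0
--     for l in list:
--         if l[1] == f1y:
--             f1x = l[0]
--         if l[1] == f2y:
--             f2x = l[0]
--         if l[1] == f3y:
--             f3x = l[0]
--         if l[1] == f4y: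
--             f4x = l[0]
--     points =[(f1x,f1y) ,(f2x,f2y) ,(f3x,f3y) ,(f4x,f4y)]
--
--     return points
-- ===== SOURCE B (Python) =====
-- def build_Guiding_Points(sort_by_x_distance, list):
--     # For each selected y, search list back-to-front and stop at the first
--     # match (= last occurrence in original order); 0 if absent.
--     def last_x_for(y):
--         for x, yy in reversed(list):
--             if yy == y:
--                 return x
--         return 0
--     ys = [sort_by_x_distance[2], sort_by_x_distance[0],
--           sort_by_x_distance[4], sort_by_x_distance[1]]
--     return [(last_x_for(y), y) for y in ys]
-- ===== Notes on version B (the rewrite author's own statement) =====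
-- stated objective: alternative
-- what changed: Replaces A's single forward pass maintaining four running accumulators by four independent backward searches with early exit (first match from the back = last occurrence, default 0).
import Mathlib
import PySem

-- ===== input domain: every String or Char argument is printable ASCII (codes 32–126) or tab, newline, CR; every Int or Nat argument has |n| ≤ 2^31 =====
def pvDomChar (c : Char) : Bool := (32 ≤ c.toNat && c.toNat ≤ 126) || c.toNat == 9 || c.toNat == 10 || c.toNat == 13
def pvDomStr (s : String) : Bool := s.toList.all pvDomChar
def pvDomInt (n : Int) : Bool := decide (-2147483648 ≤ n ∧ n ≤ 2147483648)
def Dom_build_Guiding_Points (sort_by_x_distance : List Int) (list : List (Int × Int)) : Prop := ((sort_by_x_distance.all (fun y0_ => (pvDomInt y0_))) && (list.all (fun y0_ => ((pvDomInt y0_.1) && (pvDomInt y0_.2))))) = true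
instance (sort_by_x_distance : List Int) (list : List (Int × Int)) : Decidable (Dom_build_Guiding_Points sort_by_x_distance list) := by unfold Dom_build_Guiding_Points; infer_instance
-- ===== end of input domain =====

-- B replaces A's single forward pass with four running accumulators by four independent
-- backward early-exit searches (first match from the back = last occurrence, default 0).

-- ===== PORT A =====
-- quadStep is the body of A's for-loop (the four sequential if-assignments);
-- the out-of-range reads sort_by_x_distance[i] raise IndexError, mirrored by
-- pyGet? = none (excluded by Pre_).
def quadStep (f1y f2y f3y f4y : Int) (st : Int × Int × Int × Int) (l : Int × Int) : Int × Int × Int × Int :=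
  let st := if l.2 == f1y then (l.1, st.2.1, st.2.2.1, st.2.2.2) else st
  let st := if l.2 == f2y then (st.1, l.1, st.2.2.1, st.2.2.2) else st
  let st := if l.2 == f3y then (st.1, st.2.1, l.1, st.2.2.2) else st
  let st := if l.2 == f4y then (st.1, st.2.1, st.2.2.1, l.1) else st
  st

def build_Guiding_Points (sort_by_x_distance : List Int) (list : List (Int × Int)) : List (Int × Int) :=
  match PySem.List.pyGet? sort_by_x_distance 2, PySem.List.pyGet? sort_by_x_distance 0,
        PySem.List.pyGet? sort_by_x_distance 4, PySem.List.pyGet? sort_by_x_distance 1 with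
  | some f1y, some f2y, some f3y, some f4y =>
    let st := list.foldl (quadStep f1y f2y f3y f4y) (0, 0, 0, 0)
    [(st.1, f1y), (st.2.1, f2y), (st.2.2.1, f3y), (st.2.2.2, f4y)]
  | _, _, _, _ => []

-- ===== PORT B =====
-- lastXFor is B's early-exit loop over the (already reversed) list: return at the
-- first match, 0 when the list is exhausted.
def lastXFor : List (Int × Int) → Int → Int
  | [], _ => 0
  | l :: rest, y => if l.2 == y then l.1 else lastXFor rest y

def build_Guiding_Points_alt (sort_by_x_distance : List Int) (list : List (Int × Int)) : List (Int × Int) :=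
  match PySem.List.pyGet? sort_by_x_distance 2 with
  | none => []
  | some y1 =>
    match PySem.List.pyGet? sort_by_x_distance 0 with
    | none => []
    | some y2 =>
      match PySem.List.pyGet? sort_by_x_distance 4 with
      | none => []
      | some y3 =>
        match PySem.List.pyGet? sort_by_x_distance 1 with
        | none => []
        | some y4 =>
          [y1, y2, y3, y4].map (fun y => (lastXFor list.reverse y, y))

-- ===== PRECONDITION & SPEC =====
-- Pre_ excludes exactly the inputs where A raises IndexError (fewer than 5 selected y-values).
def Pre_build_Guiding_Points (sort_by_x_distance : List Int) (list : List (Int × Int)) : Prop :=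
  5 ≤ sort_by_x_distance.length
instance (sort_by_x_distance : List Int) (list : List (Int × Int)) : Decidable (Pre_build_Guiding_Points sort_by_x_distance list) := by unfold Pre_build_Guiding_Points; infer_instance
def pvWitness_build_Guiding_Points : List Int × (List (Int × Int)) := ([3, 1, 4, 1, 5], [(10, 4), (20, 1), (30, 3)])

def Spec_build_Guiding_Points (sort_by_x_distance : List Int) (list : List (Int × Int)) (out : List (Int × Int)) : Prop := out = build_Guiding_Points_alt sort_by_x_distance list
instance (sort_by_x_distance : List Int) (list : List (Int × Int)) (out : List (Int × Int)) : Decidable (Spec_build_Guiding_Points sort_by_x_distance list out) := by unfold Spec_build_Guiding_Points; infer_instance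

-- ===== CLAIM (what is proved, stated in full; the proofs are below) =====
def Claim_equal_build_Guiding_Points : Prop := ∀ (sort_by_x_distance : List Int) (list : List (Int × Int)), Dom_build_Guiding_Points sort_by_x_distance list → Pre_build_Guiding_Points sort_by_x_distance list → Spec_build_Guiding_Points sort_by_x_distance list (build_Guiding_Points sort_by_x_distance list)

-- ===== LEMMAS AND PROOFS =====

-- A's single-target accumulator fold (started at 0) = B's backward first-match search
theorem fold_eq_lastXFor (y : Int) (list : List (Int × Int)) :
    list.foldl (fun (a : Int) l => if l.2 == y then l.1 else a) 0 = lastXFor list.reverse y := by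
  induction list using List.reverseRecOn with
  | nil => rfl
  | append_singleton xs p ih =>
      simp only [List.foldl_append, List.foldl_cons, List.foldl_nil, List.reverse_append,
        List.reverse_singleton, List.singleton_append, lastXFor, ih]

theorem quadStep_eq (y1 y2 y3 y4 a b c e : Int) (p : Int × Int) :
    quadStep y1 y2 y3 y4 (a, b, c, e) p
      = (if p.2 == y1 then p.1 else a, if p.2 == y2 then p.1 else b,
         if p.2 == y3 then p.1 else c, if p.2 == y4 then p.1 else e) := by
  unfold quadStep
  by_cases h1 : p.2 == y1 <;> by_cases h2 : p.2 == y2 <;>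
    by_cases h3 : p.2 == y3 <;> by_cases h4 : p.2 == y4 <;> simp [h1, h2, h3, h4]

-- each component of A's quadruple fold is the corresponding single-accumulator fold
theorem quad_fold_components (y1 y2 y3 y4 : Int) (list : List (Int × Int)) :
    ∀ (a b c e : Int),
    list.foldl (quadStep y1 y2 y3 y4) (a, b, c, e)
    = (list.foldl (fun (x : Int) l => if l.2 == y1 then l.1 else x) a,
       list.foldl (fun (x : Int) l => if l.2 == y2 then l.1 else x) b,
       list.foldl (fun (x : Int) l => if l.2 == y3 then l.1 else x) c,
       list.foldl (fun (x : Int) l => if l.2 == y4 then l.1 else x) e) := by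
  induction list with
  | nil => intro a b c e; rfl
  | cons p rest ih =>
      intro a b c e
      simp only [List.foldl_cons, quadStep_eq, ih]

-- ===== VERDICT (by name: the statement is the Claim_ definition above) =====
theorem build_Guiding_Points_spec : Claim_equal_build_Guiding_Points := by
  intro s list _ hpre
  unfold Spec_build_Guiding_Points build_Guiding_Points build_Guiding_Points_alt
  have hlen : 5 ≤ s.length := hpre
  have h2 : PySem.List.pyGet? s (2 : Int) = some (s[2]'(by omega)) :=
    PySem.List.pyGet?_ofNat s 2 (by omega)
  have h0 : PySem.List.pyGet? s (0 : Int) = some (s[0]'(by omega)) :=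
    PySem.List.pyGet?_ofNat s 0 (by omega)
  have h4 : PySem.List.pyGet? s (4 : Int) = some (s[4]'(by omega)) :=
    PySem.List.pyGet?_ofNat s 4 (by omega)
  have h1 : PySem.List.pyGet? s (1 : Int) = some (s[1]'(by omega)) :=
    PySem.List.pyGet?_ofNat s 1 (by omega)
  rw [h2, h0, h4, h1]
  simp only [List.map, quad_fold_components, fold_eq_lastXFor]
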